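-- pv_equiv track=rewrite | github.com/jameschengpeng/MCMC-of-Final-Year-Project-HKU | focus_one_color/utils_converge.py | converge_stop
-- ===== SOURCE A (Python) =====
-- def converge_stop(sequence, threshold):
--     for i in range(len(sequence)):
--         if i >= 100:
--             checker = True
--             for j in sequence[i-100:i]:
--                 if abs(j) > threshold:
--                     checker = False
--                     break
--             if checker == True:
--                 return i
--     return 0
-- ===== SOURCE B (Python) =====
-- def converge_stop(sequence, threshold):
--     # Sliding-window: track the index of the last threshold violation seen;
--     # the 100-window before i is clean iff that index is < i - 100.
--     last = -1
--     for i, x in enumerate(sequence):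
--         if i >= 100 and last < i - 100:
--             return i
--         if abs(x) > threshold:
--             last = i
--     return 0
-- ===== Notes on version B (the rewrite author's own statement) =====
-- stated objective: faster
-- what changed: B replaces A's re-scan of the 100-element window at every index by a single pass that tracks the index of the last threshold violation, making the window check O(1) per step.
import Mathlib
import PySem

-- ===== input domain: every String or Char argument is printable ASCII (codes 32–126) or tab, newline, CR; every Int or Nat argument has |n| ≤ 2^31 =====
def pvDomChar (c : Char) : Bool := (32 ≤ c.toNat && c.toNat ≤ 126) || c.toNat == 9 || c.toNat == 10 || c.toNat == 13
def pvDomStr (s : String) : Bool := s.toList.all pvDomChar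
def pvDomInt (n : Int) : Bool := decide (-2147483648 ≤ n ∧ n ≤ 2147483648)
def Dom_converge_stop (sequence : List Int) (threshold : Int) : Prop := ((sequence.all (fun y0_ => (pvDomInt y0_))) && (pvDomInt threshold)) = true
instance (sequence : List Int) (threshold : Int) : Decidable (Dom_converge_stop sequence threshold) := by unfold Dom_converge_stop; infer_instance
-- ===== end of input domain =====

-- B replaces A's re-scan of the 100-element window at each index by tracking the
-- index of the last threshold violation (O(1) window check per step): objective 'faster'.

-- ===== PORT A =====
-- inner loop 'for j in sequence[i-100:i]: if abs(j) > threshold: checker = False; break'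
def csCheck (threshold : Int) : List Int → Bool
  | [] => true
  | j :: rest => if |j| > threshold then false else csCheck threshold rest

-- outer loop 'for i in range(len(sequence)): …'
def csLoopA (sequence : List Int) (threshold : Int) (i : Nat) : Int :=
  if _h : i < sequence.length then
    if 100 ≤ i then
      if csCheck threshold (PySem.List.slice sequence (some ((i : Int) - 100)) (some (i : Int))) then
        (i : Int)
      else csLoopA sequence threshold (i + 1)
    else csLoopA sequence threshold (i + 1)
  else 0
termination_by sequence.length - i

def converge_stop (sequence : List Int) (threshold : Int) : Int :=
  csLoopA sequence threshold 0

-- ===== PORT B =====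
-- 'for i, x in enumerate(sequence): if i >= 100 and last < i - 100: return i; if abs(x) > threshold: last = i'
def csLoopB (threshold : Int) : List Int → Nat → Int → Int
  | [], _, _ => 0
  | x :: rest, i, last =>
    if 100 ≤ i ∧ last < (i : Int) - 100 then (i : Int)
    else csLoopB threshold rest (i + 1) (if |x| > threshold then (i : Int) else last)

def converge_stop_alt (sequence : List Int) (threshold : Int) : Int :=
  csLoopB threshold sequence 0 (-1)

-- ===== PRECONDITION & SPEC =====
def Spec_converge_stop (sequence : List Int) (threshold : Int) (out : Int) : Prop := out = converge_stop_alt sequence threshold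
instance (sequence : List Int) (threshold : Int) (out : Int) : Decidable (Spec_converge_stop sequence threshold out) := by unfold Spec_converge_stop; infer_instance

-- ===== CLAIM (what is proved, stated in full; the proofs are below) =====
def Claim_equal_converge_stop : Prop := ∀ (sequence : List Int) (threshold : Int), Dom_converge_stop sequence threshold → Spec_converge_stop sequence threshold (converge_stop sequence threshold)

-- ===== LEMMAS AND PROOFS =====

-- the loop invariant: `last` is the index of the most recent violation before i (or -1)
def csInv (sequence : List Int) (threshold : Int) (i : Nat) (last : Int) : Prop :=
  -1 ≤ last ∧ last < (i : Int) ∧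
  (∀ j : Nat, j < i → last < (j : Int) → ∀ h : j < sequence.length, |sequence[j]| ≤ threshold) ∧
  (0 ≤ last → ∃ h : last.toNat < sequence.length, |sequence[last.toNat]| > threshold)

lemma csCheck_eq_true_iff (threshold : Int) (l : List Int) :
    csCheck threshold l = true ↔ ∀ x ∈ l, |x| ≤ threshold := by
  induction l with
  | nil => simp [csCheck]
  | cons j rest ih =>
    simp only [csCheck, List.mem_cons]
    split_ifs with h
    · constructor
      · intro hc; exact absurd hc (by simp)
      · intro hall; exact absurd (hall j (Or.inl rfl)) (by omega)
    · constructor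
      · intro hc x hx
        rcases hx with rfl | hx
        · omega
        · exact (ih.mp hc) x hx
      · intro hall; exact ih.mpr (fun x hx => hall x (Or.inr hx))

lemma csWindow_iff (sequence : List Int) (threshold : Int) (i : Nat) (last : Int)
    (hi : 100 ≤ i) (hlen : i ≤ sequence.length) (hinv : csInv sequence threshold i last) :
    (csCheck threshold (PySem.List.slice sequence (some ((i : Int) - 100)) (some (i : Int))) = true)
      ↔ last < (i : Int) - 100 := by
  obtain ⟨hm1, hlt, hgood, hviol⟩ := hinv
  have hcast : ((i : Int) - 100) = ((i - 100 : Nat) : Int) := by omega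
  rw [hcast, PySem.List.slice_natCast, csCheck_eq_true_iff]
  have hsub : i - (i - 100) = 100 := by omega
  constructor
  · intro hall
    by_contra hge
    push Not at hge
    have h0 : 0 ≤ last := by omega
    obtain ⟨hlb, hb⟩ := hviol h0
    -- sequence[last.toNat] is in the window
    have hjlo : i - 100 ≤ last.toNat := by omega
    have hjhi : last.toNat < i := by omega
    have hmem : sequence[last.toNat] ∈ (sequence.drop (i - 100)).take (i - (i - 100)) := by
      rw [hsub]
      have hm : last.toNat - (i - 100) < ((sequence.drop (i - 100)).take 100).length := by
        simp [List.length_take, List.length_drop]; omega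
      have hval : ((sequence.drop (i - 100)).take 100)[last.toNat - (i - 100)] = sequence[last.toNat] := by
        rw [List.getElem_take, List.getElem_drop]
        congr 1; omega
      rw [← hval]
      exact List.getElem_mem hm
    exact absurd (hall _ hmem) (by omega)
  · intro hlast x hx
    rw [hsub] at hx
    obtain ⟨m, hmlt, hmx⟩ := List.getElem_of_mem (List.mem_of_mem_take hx)
    -- x appears in the window at some index j with i-100 ≤ j < i
    have hxlen : x ∈ (sequence.drop (i - 100)).take 100 := hx
    obtain ⟨k, hk, hkx⟩ := List.getElem_of_mem hxlen
    have hk100 : k < 100 := lt_of_lt_of_le hk (by simp [List.length_take])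
    have hklen : k < (sequence.drop (i - 100)).length := by
      simp only [List.length_take] at hk; omega
    have hkd : (sequence.drop (i - 100)).length = sequence.length - (i - 100) := by
      simp [List.length_drop]
    have hj : i - 100 + k < sequence.length := by omega
    have hxval : sequence[i - 100 + k] = x := by
      rw [← hkx, List.getElem_take, List.getElem_drop]
    rw [← hxval]
    exact hgood (i - 100 + k) (by omega) (by omega) hj

lemma csInv_step (sequence : List Int) (threshold : Int) (i : Nat) (last : Int)
    (hilen : i < sequence.length) (hinv : csInv sequence threshold i last) :
    csInv sequence threshold (i + 1) (if |sequence[i]| > threshold then (i : Int) else last) := by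
  obtain ⟨hm1, hlt, hgood, hviol⟩ := hinv
  split_ifs with hb
  · refine ⟨by omega, by omega, ?_, ?_⟩
    · intro j hj hgt h
      omega
    · intro _
      have : (i : Int).toNat = i := by omega
      rw [this]
      exact ⟨hilen, hb⟩
  · refine ⟨hm1, by omega, ?_, hviol⟩
    intro j hj hgt h
    rcases Nat.lt_succ_iff_lt_or_eq.mp hj with hj' | rfl
    · exact hgood j hj' hgt h
    · omega

lemma csLoop_eq (sequence : List Int) (threshold : Int) :
    ∀ d i last, sequence.length - i = d → csInv sequence threshold i last →
      csLoopA sequence threshold i = csLoopB threshold (sequence.drop i) i last := by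
  intro d
  induction d with
  | zero =>
    intro i last hd _
    rw [csLoopA, List.drop_eq_nil_of_le (by omega)]
    simp only [csLoopB]
    rw [dif_neg (by omega)]
  | succ d ih =>
    intro i last hd hinv
    have hilen : i < sequence.length := by omega
    have hdrop : sequence.drop i = sequence[i] :: sequence.drop (i + 1) :=
      List.drop_eq_getElem_cons hilen
    rw [csLoopA, dif_pos hilen, hdrop]
    simp only [csLoopB]
    by_cases hi : 100 ≤ i
    · rw [if_pos hi]
      have hwin := csWindow_iff sequence threshold i last hi (le_of_lt hilen) hinv
      by_cases hc : csCheck threshold (PySem.List.slice sequence (some ((i : Int) - 100)) (some (i : Int))) = true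
      · rw [if_pos hc, if_pos ⟨hi, hwin.mp hc⟩]
      · rw [if_neg hc, if_neg (by
          intro ⟨_, hl⟩
          exact hc (hwin.mpr hl))]
        exact ih (i + 1) _ (by omega) (csInv_step sequence threshold i last hilen hinv)
    · rw [if_neg hi, if_neg (by intro ⟨h, _⟩; exact hi h)]
      exact ih (i + 1) _ (by omega) (csInv_step sequence threshold i last hilen hinv)

-- ===== VERDICT (by name: the statement is the Claim_ definition above) =====
theorem converge_stop_spec : Claim_equal_converge_stop := by
  intro sequence threshold _
  unfold Spec_converge_stop converge_stop converge_stop_alt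
  have := csLoop_eq sequence threshold sequence.length 0 (-1) (by omega)
    ⟨le_refl _, by omega, by intro j hj _ _; omega, by omega⟩
  simpa using this
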